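-- pv_equiv track=rewrite | github.com/Bytb/RCN | HelperFunctions.py | count_edge_in_cycles
-- ===== SOURCE A (Python) =====
-- def count_edge_in_cycles(edge, cycles):
--     u, v = edge
--     count = 0
--     for cycle in cycles:
--         cycle_edges = set()
--         for i in range(len(cycle)):
--             a, b = cycle[i], cycle[(i + 1) % len(cycle)]
--             cycle_edges.add(frozenset((a, b)))
--         if frozenset((u, v)) in cycle_edges:
--             count += 1
--     return count
-- ===== SOURCE B (Python) =====
-- def count_edge_in_cycles(edge, cycles):
--     u, v = edge
--     count = 0
--     for cycle in cycles:
--         n = len(cycle)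
--         if any(cycle[(i + 1) % n] == v or cycle[i - 1] == v
--                for i in range(n) if cycle[i] == u):
--             count += 1
--     return count
-- ===== Notes on version B (the rewrite author's own statement) =====
-- stated objective: faster
-- what changed: A materialises, per cycle, the set of all its edges as frozensets and tests membership; B never builds any edge representation: it scans each cycle for occurrences of the endpoint u and checks whether a cyclic neighbour (successor, or predecessor via cycle[i-1]) of that occurrence equals v, short-circuiting on the first hit.
import Mathlib
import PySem

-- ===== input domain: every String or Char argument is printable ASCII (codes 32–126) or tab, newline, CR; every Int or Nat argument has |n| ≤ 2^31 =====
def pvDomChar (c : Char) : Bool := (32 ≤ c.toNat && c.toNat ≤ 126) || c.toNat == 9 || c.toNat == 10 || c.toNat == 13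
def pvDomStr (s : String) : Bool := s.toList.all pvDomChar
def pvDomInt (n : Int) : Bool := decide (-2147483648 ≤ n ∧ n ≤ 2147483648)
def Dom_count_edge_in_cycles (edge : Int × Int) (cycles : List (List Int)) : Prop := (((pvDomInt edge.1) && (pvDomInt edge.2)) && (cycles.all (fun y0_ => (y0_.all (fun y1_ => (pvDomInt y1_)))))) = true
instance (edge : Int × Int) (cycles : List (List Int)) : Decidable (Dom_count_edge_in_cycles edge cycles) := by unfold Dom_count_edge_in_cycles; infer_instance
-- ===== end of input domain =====

-- B drops A's per-cycle set of edge frozensets entirely: it scans each cycle only for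
-- occurrences of the endpoint u and checks whether a cyclic neighbour of that occurrence
-- is v, short-circuiting (objective: faster by a constant factor — no per-edge allocation).

-- ===== PORT A =====
-- frozenset((a, b)) of two ints is encoded by its canonical sorted pair; this is exact because
-- frozenset equality on {a, b} coincides with equality of these canonical pairs.
def pvFro (a b : Int) : Int × Int := if a ≤ b then (a, b) else (b, a)

def count_edge_in_cycles (edge : Int × Int) (cycles : List (List Int)) : Int :=
  let u := edge.1
  let v := edge.2
  cycles.foldl (fun count cycle =>
    let cycleEdges : PySem.Set (Int × Int) :=
      (PySem.List.pyRange 0 (PySem.List.len cycle) 1).foldl (fun s i =>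
        let a := PySem.List.pyGetD cycle i 0
        let b := PySem.List.pyGetD cycle (PySem.Int.mod (i + 1) (PySem.List.len cycle)) 0
        PySem.Set.add s (pvFro a b)) PySem.Set.empty
    if PySem.Set.contains cycleEdges (pvFro u v) then count + 1 else count) 0

-- ===== PORT B =====
def count_edge_in_cycles_alt (edge : Int × Int) (cycles : List (List Int)) : Int :=
  let u := edge.1
  let v := edge.2
  cycles.foldl (fun count cycle =>
    let n := PySem.List.len cycle
    if (PySem.List.pyRange 0 n 1).any (fun i =>
         PySem.List.pyGetD cycle i 0 == u &&
           (PySem.List.pyGetD cycle (PySem.Int.mod (i + 1) n) 0 == v ||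
            PySem.List.pyGetD cycle (i - 1) 0 == v))
    then count + 1 else count) 0

-- ===== PRECONDITION & SPEC =====
def Spec_count_edge_in_cycles (edge : Int × Int) (cycles : List (List Int)) (out : Int) : Prop := out = count_edge_in_cycles_alt edge cycles
instance (edge : Int × Int) (cycles : List (List Int)) (out : Int) : Decidable (Spec_count_edge_in_cycles edge cycles out) := by unfold Spec_count_edge_in_cycles; infer_instance

-- ===== CLAIM (what is proved, stated in full; the proofs are below) =====
def Claim_equal_count_edge_in_cycles : Prop := ∀ (edge : Int × Int) (cycles : List (List Int)), Dom_count_edge_in_cycles edge cycles → Spec_count_edge_in_cycles edge cycles (count_edge_in_cycles edge cycles)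

-- ===== LEMMAS AND PROOFS =====

-- two unordered pairs of ints are equal iff the pairs match in one of the two orders
lemma pvFro_eq (a b u v : Int) :
    pvFro a b = pvFro u v ↔ (a = u ∧ b = v) ∨ (a = v ∧ b = u) := by
  unfold pvFro
  split_ifs <;> simp [Prod.ext_iff] <;> omega

-- per-cycle: A's edge-set membership test equals B's u-occurrence neighbour scan
lemma pv_cycle_eq (u v : Int) (c : List Int) :
    PySem.Set.contains
      ((PySem.List.pyRange 0 (PySem.List.len c) 1).foldl (fun s i =>
        PySem.Set.add s (pvFro (PySem.List.pyGetD c i 0)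
          (PySem.List.pyGetD c (PySem.Int.mod (i + 1) (PySem.List.len c)) 0))) PySem.Set.empty)
      (pvFro u v)
    = (PySem.List.pyRange 0 (PySem.List.len c) 1).any (fun i =>
        PySem.List.pyGetD c i 0 == u &&
          (PySem.List.pyGetD c (PySem.Int.mod (i + 1) (PySem.List.len c)) 0 == v ||
           PySem.List.pyGetD c (i - 1) 0 == v)) := by
  rw [← PySem.Set.update_map_eq_foldl_add, PySem.Set.update_empty]
  rw [Bool.eq_iff_iff, PySem.Set.contains_iff, PySem.Set.mem_ofList]
  simp only [List.mem_map, List.any_eq_true, Bool.and_eq_true, Bool.or_eq_true, beq_iff_eq,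
    PySem.List.mem_pyRange_one, PySem.List.len_eq, pvFro_eq]
  rcases eq_or_ne c [] with hc | hc
  · subst hc
    exact iff_of_false (by rintro ⟨i, ⟨h1, h2⟩, -⟩; simp at h2; omega)
      (by rintro ⟨i, ⟨h1, h2⟩, -⟩; simp at h2; omega)
  have hn : (0 : Int) < (c.length : Int) := by
    have := List.length_pos_iff.mpr hc; exact_mod_cast this
  have hmod : ∀ a : Int, PySem.Int.mod a (c.length : Int) = a % (c.length : Int) :=
    fun a => PySem.Int.mod_eq_emod_of_pos hn
  have heq : ∀ x : Int, 0 ≤ x → x < (c.length : Int) →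
      PySem.Int.mod x (c.length : Int) = x :=
    fun x h1 h2 => by rw [hmod]; exact Int.emod_eq_of_lt h1 h2
  have hself : PySem.Int.mod (c.length : Int) (c.length : Int) = 0 := by
    rw [hmod]; exact Int.emod_self
  constructor
  · rintro ⟨i, ⟨hi0, hin⟩, h⟩
    rcases h with ⟨ha, hb⟩ | ⟨ha, hb⟩
    · exact ⟨i, ⟨hi0, hin⟩, ha, Or.inl hb⟩
    · -- pair (v, u) at i: u occurs just after i, and its predecessor holds v
      rcases lt_or_ge (i + 1) (c.length : Int) with hlt | hge
      · refine ⟨i + 1, ⟨by omega, hlt⟩, ?_, Or.inr ?_⟩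
        · rw [heq (i + 1) (by omega) hlt] at hb; exact hb
        · rw [show i + 1 - 1 = i by ring]; exact ha
      · have hie : i = (c.length : Int) - 1 := by omega
        refine ⟨0, ⟨le_refl 0, hn⟩, ?_, Or.inr ?_⟩
        · rw [hie, show (c.length : Int) - 1 + 1 = (c.length : Int) by ring, hself] at hb
          exact hb
        · rw [show (0 : Int) - 1 = -1 by ring, PySem.List.pyGetD_neg_one c 0 hc,
            List.getLast_eq_getElem]
          rw [PySem.List.pyGetD_eq_getElem c 0 hi0 hin] at ha
          rw [← ha]
          congr 1
          omega
  · rintro ⟨i, ⟨hi0, hin⟩, hu, h⟩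
    rcases h with hb | hb
    · exact ⟨i, ⟨hi0, hin⟩, Or.inl ⟨hu, hb⟩⟩
    · -- the predecessor of the u-occurrence at i holds v: the (v, u) pair sits one step back
      rcases lt_or_ge 0 i with hpos | hz
      · refine ⟨i - 1, ⟨by omega, by omega⟩, Or.inr ⟨?_, ?_⟩⟩
        · exact hb
        · rw [show i - 1 + 1 = i by ring, heq i hi0 hin]; exact hu
      · have hie : i = 0 := by omega
        subst hie
        refine ⟨(c.length : Int) - 1, ⟨by omega, by omega⟩, Or.inr ⟨?_, ?_⟩⟩
        · rw [show (0 : Int) - 1 = -1 by ring, PySem.List.pyGetD_neg_one c 0 hc,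
            List.getLast_eq_getElem] at hb
          rw [PySem.List.pyGetD_eq_getElem c 0
              (by omega : (0 : Int) ≤ (c.length : Int) - 1)
              (by omega : (c.length : Int) - 1 < (c.length : Int)), ← hb]
          congr 1
          omega
        · rw [show (c.length : Int) - 1 + 1 = (c.length : Int) by ring, hself]
          exact hu

-- ===== VERDICT (by name: the statement is the Claim_ definition above) =====
theorem count_edge_in_cycles_spec : Claim_equal_count_edge_in_cycles := by
  intro edge cycles _
  unfold Spec_count_edge_in_cycles count_edge_in_cycles count_edge_in_cycles_alt
  obtain ⟨u, v⟩ := edge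
  simp only
  congr 1
  funext count cycle
  rw [pv_cycle_eq]
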